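-- pv_equiv track=rewrite | github.com/leopoldoromero/poker-calculator | app/equity/infrastructure/hands_from_range_generator.py | generate
-- ===== SOURCE A (Python) =====
-- from itertools import product, combinations
--
-- def generate(range_list, excluded_cards):
--     """
--     Generate all valid hole card combinations from a given hand range.
--     Excludes hands containing known cards (e.g., board and hero's hand).
--
--     :param range_list: List of hand combos like ["AQs", "AQo", "JJ"]
--     :param excluded_cards: List of already known cards (board, hero hand)
--     :return: List of all possible hands matching the range
--     """
--     all_hands = []
--     suits = ["s", "h", "d", "c"]
--
--     for hand in range_list:
--         rank1, rank2 = hand[:2]  # Extract rank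
--         suited = hand[2:] if len(hand) == 3 else None  # "s" or "o" or empty
--
--         possible_hands = []
--
--         if rank1 == rank2:  # Pocket pairs (e.g., "JJ")
--             for suit1, suit2 in combinations(suits, 2):  # All suit combos
--                 hole_cards = [rank1 + suit1, rank2 + suit2]
--
--                 if not any(c in excluded_cards for c in hole_cards):
--                     possible_hands.append(hole_cards)
--
--         else:  # Non-pocket pair hands
--             for suit1, suit2 in product(suits, repeat=2):
--                 if suited == "s" and suit1 != suit2:
--                     continue  # Skip offsuit if suited-only
--                 if suited == "o" and suit1 == suit2:
--                     continue  # Skip suited if offsuit-only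
--
--                 hole_cards = [rank1 + suit1, rank2 + suit2]
--
--                 if not any(c in excluded_cards for c in hole_cards):
--                     possible_hands.append(hole_cards)
--
--         all_hands.extend(possible_hands)
--
--     return all_hands
-- ===== SOURCE B (Python) =====
-- _SUITS = ("s", "h", "d", "c")
-- _ANY = [(a, b) for a in _SUITS for b in _SUITS]
-- _TEMPLATES = {
--     "pair": [(a, b) for i, a in enumerate(_SUITS) for b in _SUITS[i + 1:]],
--     "s": [(a, a) for a in _SUITS],
--     "o": [(a, b) for a, b in _ANY if a != b],
--     None: _ANY,
-- }
--
-- def generate(range_list, excluded_cards):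
--     """Table-driven + memoized rewrite: the suit-pair patterns for each hand
--     shape are precomputed module constants selected by key, and the combo list
--     for each distinct (rank1, rank2, shape) spec is computed once and cached."""
--     excl = set(excluded_cards)
--     cache = {}
--     out = []
--     for hand in range_list:
--         r1, r2 = hand[0], hand[1]
--         flag = hand[2] if len(hand) == 3 else None
--         key = "pair" if r1 == r2 else (flag if flag in ("s", "o") else None)
--         spec = (r1, r2, key)
--         hands = cache.get(spec)
--         if hands is None:
--             hands = [[r1 + s1, r2 + s2] for s1, s2 in _TEMPLATES[key]
--                      if r1 + s1 not in excl and r2 + s2 not in excl]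
--             cache[spec] = hands
--         out.extend(hands)
--     return out
-- ===== Notes on version B (the rewrite author's own statement) =====
-- stated objective: alternative
-- what changed: A iterates over all suit pairs per hand and tests each two-card combo with branching inside the loop; B precomputes four suit-pair template tables (pair/suited/offsuit/any) as module constants, selects one by the hand's shape key, filters it against a set of excluded cards, and memoizes the resulting combo list per distinct (rank1, rank2, shape) spec so repeated specs are never recomputed.
import Mathlib
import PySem

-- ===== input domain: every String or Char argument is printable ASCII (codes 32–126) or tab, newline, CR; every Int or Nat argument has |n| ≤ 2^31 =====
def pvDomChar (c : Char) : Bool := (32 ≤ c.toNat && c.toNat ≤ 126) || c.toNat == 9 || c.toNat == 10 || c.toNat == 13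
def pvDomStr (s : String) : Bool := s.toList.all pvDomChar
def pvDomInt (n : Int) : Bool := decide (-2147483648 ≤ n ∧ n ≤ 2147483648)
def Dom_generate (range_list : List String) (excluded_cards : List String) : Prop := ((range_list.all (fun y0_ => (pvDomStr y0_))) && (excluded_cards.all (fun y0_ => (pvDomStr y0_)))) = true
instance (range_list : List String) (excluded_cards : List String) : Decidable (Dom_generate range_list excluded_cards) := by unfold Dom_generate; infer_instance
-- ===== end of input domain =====

-- B replaces A's per-hand suit loops and branching by precomputed suit-pair template
-- tables selected by the hand's shape, plus a memo dict caching the combo list per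
-- distinct (rank1, rank2, shape) spec; same return value and order.

-- ===== PORT A =====
-- suits = ["s", "h", "d", "c"] (one-character strings, kept as Chars; `card` re-attaches the rank)
def genSuits : List Char := ['s', 'h', 'd', 'c']

-- rank1 + suit1: concatenation of two one-character strings (exact)
def card (r s : Char) : String := String.ofList [r, s]

-- itertools.combinations(l, 2) in iteration order
def combos2 : List Char → List (Char × Char)
  | [] => []
  | x :: xs => xs.map (fun y => (x, y)) ++ combos2 xs

-- itertools.product(l, repeat=2) in iteration order
def prodSq (l : List Char) : List (Char × Char) := l.flatMap (fun a => l.map (fun b => (a, b)))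

-- loop body of A for one hand (returns `possible_hands`); hands shorter than 2 chars make
-- Python's tuple unpacking raise (excluded by Pre_), the port returns [] there
def genHandA (excluded_cards : List String) (hand : String) : List (List String) :=
  match hand.toList with
  | r1 :: r2 :: rest =>
    -- suited = hand[2:] if len(hand) == 3 else None
    let suited : Option Char := match rest with | [c] => some c | _ => none
    if r1 = r2 then
      (combos2 genSuits).foldl (fun acc p =>
        if ¬ ([card r1 p.1, card r2 p.2].any (fun c => excluded_cards.contains c)) then
          acc ++ [[card r1 p.1, card r2 p.2]]
        else acc) []
    else
      (prodSq genSuits).foldl (fun acc p =>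
        if suited = some 's' ∧ p.1 ≠ p.2 then acc      -- continue
        else if suited = some 'o' ∧ p.1 = p.2 then acc -- continue
        else if ¬ ([card r1 p.1, card r2 p.2].any (fun c => excluded_cards.contains c)) then
          acc ++ [[card r1 p.1, card r2 p.2]]
        else acc) []
  | _ => []

def generate (range_list : List String) (excluded_cards : List String) : List (List String) :=
  range_list.foldl (fun all_hands hand => all_hands ++ genHandA excluded_cards hand) []

-- ===== PORT B =====
-- module-level template tables of Source B (the comprehensions over _SUITS, transcribed)
def tplAny : List (Char × Char) := genSuits.flatMap (fun a => genSuits.map (fun b => (a, b)))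
def tplPair : List (Char × Char) :=
  (PySem.List.enumerate genSuits).flatMap (fun ia =>
    (PySem.List.slice genSuits (some (ia.1 + 1)) none).map (fun b => (ia.2, b)))
def tplSuited : List (Char × Char) := genSuits.map (fun a => (a, a))
def tplOff : List (Char × Char) := tplAny.filter (fun p => p.1 ≠ p.2)

-- _TEMPLATES[key] (key is "pair" / "s" / "o" / None)
def tplFor : Option String → List (Char × Char)
  | some "pair" => tplPair
  | some "s" => tplSuited
  | some "o" => tplOff
  | _ => tplAny

-- key = "pair" if r1 == r2 else (flag if flag in ("s", "o") else None)
def keyOf (r1 r2 : Char) (flag : Option Char) : Option String :=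
  if r1 = r2 then some "pair"
  else if flag = some 's' then some "s"
  else if flag = some 'o' then some "o"
  else none

-- the cached combo-list comprehension of Source B for one spec
def comboList (excluded_cards : List String) (r1 r2 : Char) (key : Option String) :
    List (List String) :=
  (tplFor key).flatMap (fun p =>
    if ¬ excluded_cards.contains (card r1 p.1) ∧ ¬ excluded_cards.contains (card r2 p.2) then
      [[card r1 p.1, card r2 p.2]]
    else [])

-- one iteration of Source B's loop; state = (cache, out)
def stepB (excluded_cards : List String)
    (st : PySem.Dict (Char × Char × Option String) (List (List String)) × List (List String))
    (hand : String) :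
    PySem.Dict (Char × Char × Option String) (List (List String)) × List (List String) :=
  match hand.toList with
  | r1 :: r2 :: rest =>
    let flag : Option Char := match rest with | [c] => some c | _ => none
    let key := keyOf r1 r2 flag
    match st.1.get? (r1, r2, key) with
    | some hands => (st.1, st.2 ++ hands)
    | none =>
      let hands := comboList excluded_cards r1 r2 key
      (st.1.insert (r1, r2, key) hands, st.2 ++ hands)
  | _ => (st.1, st.2)  -- unreachable under Pre_ (Source B raises on hands shorter than 2)

def generate_alt (range_list : List String) (excluded_cards : List String) : List (List String) :=
  (range_list.foldl (stepB excluded_cards) (PySem.Dict.empty, [])).2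

-- ===== PRECONDITION & SPEC =====
-- Pre_ excludes hands shorter than two characters, on which A's tuple unpacking
-- `rank1, rank2 = hand[:2]` raises ValueError (B raises an IndexError there too).
def Pre_generate (range_list : List String) (excluded_cards : List String) : Prop :=
  ∀ h ∈ range_list, 2 ≤ h.toList.length
instance (range_list : List String) (excluded_cards : List String) : Decidable (Pre_generate range_list excluded_cards) := by unfold Pre_generate; infer_instance

def pvWitness_generate : List String × List String := (["AKs", "QQ", "72o", "T9"], ["As", "Qh"])

def Spec_generate (range_list : List String) (excluded_cards : List String) (out : List (List String)) : Prop := out = generate_alt range_list excluded_cards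
instance (range_list : List String) (excluded_cards : List String) (out : List (List String)) : Decidable (Spec_generate range_list excluded_cards out) := by unfold Spec_generate; infer_instance

-- ===== CLAIM (what is proved, stated in full; the proofs are below) =====
def Claim_equal_generate : Prop := ∀ (range_list : List String) (excluded_cards : List String), Dom_generate range_list excluded_cards → Pre_generate range_list excluded_cards → Spec_generate range_list excluded_cards (generate range_list excluded_cards)

-- ===== LEMMAS AND PROOFS =====

-- list-comprehension shape: emitting [f a] under a guard is filter-then-map
theorem flatMap_if {α β : Type} (l : List α) (p : α → Prop) [DecidablePred p] (f : α → β) :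
    l.flatMap (fun a => if p a then [f a] else []) = (l.filter (fun a => decide (p a))).map f := by
  induction l with
  | nil => rfl
  | cons a l ih => by_cases hp : p a <;> simp [hp, ih]

-- keeping only the diagonal of the 4×4 suit product is B's suited template
theorem filter_diag (q : Char × Char → Bool) :
    (prodSq genSuits).filter (fun p => decide (p.1 = p.2) && q p) = tplSuited.filter q := by
  simp [prodSq, genSuits, tplSuited, List.filter_cons]

-- keeping only the off-diagonal of the 4×4 suit product is B's offsuit template
theorem filter_offdiag (q : Char × Char → Bool) :
    (prodSq genSuits).filter (fun p => decide (¬ p.1 = p.2) && q p) = tplOff.filter q := by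
  rw [show tplOff = tplAny.filter (fun p => decide (¬ p.1 = p.2)) by rfl, List.filter_filter]
  exact List.filter_congr fun p _ => Bool.and_comm _ _

-- A's per-hand loop (either branch) equals B's template comprehension for that spec
theorem genCore_eq (excluded_cards : List String) (r1 r2 : Char) (suited : Option Char) :
    (if r1 = r2 then
      (combos2 genSuits).foldl (fun acc p =>
        if ¬ ([card r1 p.1, card r2 p.2].any (fun c => excluded_cards.contains c)) then
          acc ++ [[card r1 p.1, card r2 p.2]]
        else acc) []
    else
      (prodSq genSuits).foldl (fun acc p =>
        if suited = some 's' ∧ p.1 ≠ p.2 then acc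
        else if suited = some 'o' ∧ p.1 = p.2 then acc
        else if ¬ ([card r1 p.1, card r2 p.2].any (fun c => excluded_cards.contains c)) then
          acc ++ [[card r1 p.1, card r2 p.2]]
        else acc) [])
    = comboList excluded_cards r1 r2 (keyOf r1 r2 suited) := by
  unfold comboList keyOf
  by_cases hr : r1 = r2
  · subst hr
    rw [if_pos rfl, if_pos rfl]
    rw [show tplFor (some "pair") = combos2 genSuits from by decide]
    rw [flatMap_if, PySem.List.foldl_append_ite, List.nil_append]
    exact congrArg _ (List.filter_congr fun p _ => by simp)
  · rw [if_neg hr, if_neg hr]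
    by_cases hs : suited = some 's'
    · rw [if_pos hs]
      rw [PySem.List.foldl_congr_mem _ _ (fun acc (p : Char × Char) =>
            if (p.1 = p.2 ∧
                ¬ ([card r1 p.1, card r2 p.2].any (fun c => excluded_cards.contains c))) then
              acc ++ [[card r1 p.1, card r2 p.2]] else acc) _
          (by intro acc p _; rw [hs]; split_ifs <;> simp_all)]
      rw [PySem.List.foldl_append_ite, List.nil_append]
      rw [show tplFor (some "s") = tplSuited from rfl]
      rw [flatMap_if]
      have hc : (fun p : Char × Char =>
          decide (p.1 = p.2 ∧
            ¬ (([card r1 p.1, card r2 p.2].any (fun c => excluded_cards.contains c)) = true)))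
          = fun p => decide (p.1 = p.2) &&
              decide (¬ (([card r1 p.1, card r2 p.2].any (fun c => excluded_cards.contains c)) = true)) := by
        funext p; simp
      rw [hc, filter_diag]
      exact congrArg _ (List.filter_congr fun p _ => by simp)
    · rw [if_neg hs]
      by_cases ho : suited = some 'o'
      · rw [if_pos ho]
        rw [PySem.List.foldl_congr_mem _ _ (fun acc (p : Char × Char) =>
              if (¬ p.1 = p.2 ∧
                  ¬ ([card r1 p.1, card r2 p.2].any (fun c => excluded_cards.contains c))) then
                acc ++ [[card r1 p.1, card r2 p.2]] else acc) _
            (by intro acc p _; rw [ho]; split_ifs <;> simp_all)]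
        rw [PySem.List.foldl_append_ite, List.nil_append]
        rw [show tplFor (some "o") = tplOff from rfl]
        rw [flatMap_if]
        have hc : (fun p : Char × Char =>
            decide (¬ p.1 = p.2 ∧
              ¬ (([card r1 p.1, card r2 p.2].any (fun c => excluded_cards.contains c)) = true)))
            = fun p => decide (¬ p.1 = p.2) &&
                decide (¬ (([card r1 p.1, card r2 p.2].any (fun c => excluded_cards.contains c)) = true)) := by
          funext p; simp
        rw [hc, filter_offdiag]
        exact congrArg _ (List.filter_congr fun p _ => by simp)
      · rw [if_neg ho]
        rw [PySem.List.foldl_congr_mem _ _ (fun acc (p : Char × Char) =>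
              if (¬ ([card r1 p.1, card r2 p.2].any (fun c => excluded_cards.contains c))) then
                acc ++ [[card r1 p.1, card r2 p.2]] else acc) _
            (by intro acc p _; split_ifs <;> simp_all)]
        rw [PySem.List.foldl_append_ite, List.nil_append]
        rw [show tplFor none = prodSq genSuits from rfl]
        rw [flatMap_if]
        exact congrArg _ (List.filter_congr fun p _ => by simp)

theorem genHandA_eq (excluded_cards : List String) (r1 r2 : Char) (rest : List Char)
    (hand : String) (hl : hand.toList = r1 :: r2 :: rest) :
    genHandA excluded_cards hand =
      comboList excluded_cards r1 r2
        (keyOf r1 r2 (match rest with | [c] => some c | _ => none)) := by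
  rcases rest with _ | ⟨c, _ | ⟨c2, rest'⟩⟩ <;>
    (simp only [genHandA, hl]; exact genCore_eq excluded_cards r1 r2 _)

-- the cache only ever stores a spec's comboList, so hits return the same value:
-- Source B's loop accumulates exactly A's per-hand results in order
theorem foldB_eq (excluded_cards : List String) (l : List String)
    (d : PySem.Dict (Char × Char × Option String) (List (List String))) (out : List (List String))
    (hd : ∀ r1 r2 key hands, d.get? (r1, r2, key) = some hands →
            hands = comboList excluded_cards r1 r2 key)
    (hl : ∀ h ∈ l, 2 ≤ h.toList.length) :
    (l.foldl (stepB excluded_cards) (d, out)).2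
      = out ++ l.flatMap (fun h => genHandA excluded_cards h) := by
  induction l generalizing d out with
  | nil => simp
  | cons h t ih =>
    have hh : 2 ≤ h.toList.length := hl h (by simp)
    obtain ⟨r1, r2, rest, hlh⟩ : ∃ r1 r2 rest, h.toList = r1 :: r2 :: rest := by
      rcases e : h.toList with _ | ⟨a, _ | ⟨b, r⟩⟩ <;> simp [e] at hh ⊢
    have ht : ∀ h' ∈ t, 2 ≤ h'.toList.length := fun h' hm => hl h' (by simp [hm])
    rw [List.foldl_cons, List.flatMap_cons]
    rcases rest with _ | ⟨c, _ | ⟨c2, rest'⟩⟩ <;>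
    · rw [genHandA_eq excluded_cards r1 r2 _ h hlh, ← List.append_assoc]
      simp only [stepB, hlh]
      cases hget : d.get? (r1, r2, keyOf r1 r2 _) with
      | some hands =>
        rw [ih d _ hd ht, hd r1 r2 _ hands hget]
      | none =>
        rw [ih _ _ (by
          intro r1' r2' key' hands' h'
          rw [PySem.Dict.get?_insert] at h'
          split at h'
          · rename_i heq
            obtain ⟨e1, e2, e3⟩ : r1' = r1 ∧ r2' = r2 ∧ key' = keyOf r1 r2 _ := by
              simpa [Prod.ext_iff] using heq
            subst e1; subst e2; subst e3
            exact (Option.some_inj.mp h').symm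
          · exact hd r1' r2' key' hands' h') ht]

-- ===== VERDICT (by name: the statement is the Claim_ definition above) =====
theorem generate_spec : Claim_equal_generate := by
  intro range_list excluded_cards _ hpre
  unfold Spec_generate generate generate_alt
  rw [PySem.List.foldl_append_eq_flatMap, List.nil_append]
  rw [foldB_eq excluded_cards range_list PySem.Dict.empty []
    (by intro r1 r2 key hands hg; simp [PySem.Dict.get?_empty] at hg) hpre]
  simp
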